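-- pv_equiv track=rewrite | github.com/Prathm4/Resume-Classification | resume_Class1.py | roleApplied
-- ===== SOURCE A (Python) =====
-- terms = {'WorkDay ERP':['workday', 'workday consultant', 'workday hcm', 'eib', 'picof',
--                         'workday studio','nnbound/outbound integrations'],
--          'Peoplesoft':['peoplesoft', 'pia','ccb','birt','peci','ccw','pum','people tools',
--                         'peoplesoft implementation','peoplesoft components',
--                         'peoplesoft dba','peoplesoft admin','peoplesoft admin/dba','peopleSoft fscm',
--                         'peopletoolsupgrade','peopletools upgrade','process scheduler servers',
--                         'peoplesoft hrms','peopleSoft consultant','peopledoft cloud',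
--                         'PeopleSoft migrations','eoplesoft Testing Framework','pure internet architecture'],
--          'Database Developer':['sql','sql server', 'ms sql server','msbi', 'sql developer', 'ssis','ssrs',
--                         'ssms','t-sql','tsql','Razorsql', 'razor sql','triggers','powerbi','power bi',
--                         'oracle sql', 'pl/sql', 'pl\sql','oracle', 'oracle 11g','oledb','cte','ddl',
--                         'dml','etl','mariadb','maria db'],
--          'Java Developer':['reactjs', 'react js', 'react js developer', 'html',
--                         'css3','xml','javascript','html5','boostrap','jquery', 'redux','php', 'node js',
--                         'nodejs','apache','netbeans','nestjs','nest js','react developer','react hooks',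
--                         'jenkins']}
--
-- def roleApplied (Text):
--
--     # covert the text to lower case
--     for i in range(len(Text)):
--         Text[i] = Text[i].lower()
--
--     # Obtain the scores for each area
--     for area in terms.keys():
--         if area == 'WorkDay ERP':
--             for word in terms[area]:
--                 if word in Text:
--                     role = area
--                     return (role)
--
--         elif area == 'Peoplesoft':
--             for word in terms[area]:
--                 if word in Text:
--                     role = area
--                     return(role)
--
--         elif area == 'Database Developer':
--             for word in terms[area]:
--                 if word in Text:
--                     role =  area
--                     return(role)
--
--         elif area == 'Java Developer':
--              for word in terms[area]:
--                 if word in Text: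
--                     role = area
--                     return(role)
--         else:
--             role = "Fresher"
--             return(role)
-- ===== SOURCE B (Python) =====
-- terms = {'WorkDay ERP':['workday', 'workday consultant', 'workday hcm', 'eib', 'picof',
--                         'workday studio','nnbound/outbound integrations'],
--          'Peoplesoft':['peoplesoft', 'pia','ccb','birt','peci','ccw','pum','people tools',
--                         'peoplesoft implementation','peoplesoft components',
--                         'peoplesoft dba','peoplesoft admin','peoplesoft admin/dba','peopleSoft fscm',
--                         'peopletoolsupgrade','peopletools upgrade','process scheduler servers',
--                         'peoplesoft hrms','peopleSoft consultant','peopledoft cloud',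
--                         'PeopleSoft migrations','eoplesoft Testing Framework','pure internet architecture'],
--          'Database Developer':['sql','sql server', 'ms sql server','msbi', 'sql developer', 'ssis','ssrs',
--                         'ssms','t-sql','tsql','Razorsql', 'razor sql','triggers','powerbi','power bi',
--                         'oracle sql', 'pl/sql', 'pl\sql','oracle', 'oracle 11g','oledb','cte','ddl',
--                         'dml','etl','mariadb','maria db'],
--          'Java Developer':['reactjs', 'react js', 'react js developer', 'html',
--                         'css3','xml','javascript','html5','boostrap','jquery', 'redux','php', 'node js',
--                         'nodejs','apache','netbeans','nestjs','nest js','react developer','react hooks',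
--                         'jenkins']}
--
-- # Build once: term -> (priority, area); first occurrence of a term wins.
-- _PRIO = {}
-- _k = 0
-- for _area, _words in terms.items():
--     for _w in _words:
--         if _w not in _PRIO:
--             _PRIO[_w] = (_k, _area)
--         _k += 1
--
-- def roleApplied(Text):
--     # lowercase the tokens in place, exactly as the original does
--     for i in range(len(Text)):
--         Text[i] = Text[i].lower()
--     best = None
--     for tok in Text:
--         p = _PRIO.get(tok)
--         if p is not None and (best is None or p[0] < best[0]):
--             best = p
--     return None if best is None else best[1]
-- ===== Notes on version B (the rewrite author's own statement) =====
-- stated objective: alternative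
-- what changed: Replaces the per-area nested membership scans with a term->(priority,area) dict built once from the table and a single minimum-priority pass over the tokens.
import Mathlib
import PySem

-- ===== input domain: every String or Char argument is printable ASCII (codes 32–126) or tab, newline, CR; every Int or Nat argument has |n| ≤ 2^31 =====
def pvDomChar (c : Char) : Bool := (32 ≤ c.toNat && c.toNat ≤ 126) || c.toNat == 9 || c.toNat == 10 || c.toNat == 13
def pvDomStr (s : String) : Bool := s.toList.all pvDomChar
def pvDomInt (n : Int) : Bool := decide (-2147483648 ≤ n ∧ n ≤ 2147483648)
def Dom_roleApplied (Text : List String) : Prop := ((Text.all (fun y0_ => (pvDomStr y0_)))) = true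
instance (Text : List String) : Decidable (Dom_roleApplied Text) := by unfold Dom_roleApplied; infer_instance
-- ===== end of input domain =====

-- B replaces A's per-area nested membership scans with a term->(priority,area) dict built once
-- and a single minimum-priority pass over the tokens (objective: alternative).
-- Note: the Python A lowercases its argument list IN PLACE; B performs the same mutation;
-- the equivalence proved here is about the return value.


-- the module-level 'terms' dict, shared data of both programs (kept verbatim, including the
-- uppercase entries that can never match a lowercased token)
def pvTerms : List (String × List String) :=
  [("WorkDay ERP", ["workday", "workday consultant", "workday hcm", "eib", "picof",
                    "workday studio", "nnbound/outbound integrations"]),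
   ("Peoplesoft", ["peoplesoft", "pia", "ccb", "birt", "peci", "ccw", "pum", "people tools",
                   "peoplesoft implementation", "peoplesoft components",
                   "peoplesoft dba", "peoplesoft admin", "peoplesoft admin/dba", "peopleSoft fscm",
                   "peopletoolsupgrade", "peopletools upgrade", "process scheduler servers",
                   "peoplesoft hrms", "peopleSoft consultant", "peopledoft cloud",
                   "PeopleSoft migrations", "eoplesoft Testing Framework", "pure internet architecture"]),
   ("Database Developer", ["sql", "sql server", "ms sql server", "msbi", "sql developer", "ssis", "ssrs",
                   "ssms", "t-sql", "tsql", "Razorsql", "razor sql", "triggers", "powerbi", "power bi",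
                   "oracle sql", "pl/sql", "pl\\sql", "oracle", "oracle 11g", "oledb", "cte", "ddl",
                   "dml", "etl", "mariadb", "maria db"]),
   ("Java Developer", ["reactjs", "react js", "react js developer", "html",
                   "css3", "xml", "javascript", "html5", "boostrap", "jquery", "redux", "php", "node js",
                   "nodejs", "apache", "netbeans", "nestjs", "nest js", "react developer", "react hooks",
                   "jenkins"])]

def pvTermsDict : PySem.Dict String (List String) := PySem.Dict.ofList pvTerms

-- ===== PORT A =====
-- inner 'for word in terms[area]: if word in Text: return area'
def pvInner (T : List String) (area : String) : List String → Option String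
  | [] => none
  | w :: ws => if T.contains w then some area else pvInner T area ws

-- outer 'for area in terms.keys():' with the if/elif chain (the final else is unreachable)
def pvAreasLoop (T : List String) : List String → Option String
  | [] => none
  | area :: rest =>
    if area == "WorkDay ERP" then
      match pvInner T area (pvTermsDict.getD area []) with
      | some r => some r
      | none => pvAreasLoop T rest
    else if area == "Peoplesoft" then
      match pvInner T area (pvTermsDict.getD area []) with
      | some r => some r
      | none => pvAreasLoop T rest
    else if area == "Database Developer" then
      match pvInner T area (pvTermsDict.getD area []) with
      | some r => some r
      | none => pvAreasLoop T rest
    else if area == "Java Developer" then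
      match pvInner T area (pvTermsDict.getD area []) with
      | some r => some r
      | none => pvAreasLoop T rest
    else some "Fresher"

def roleApplied (Text : List String) : Option String :=
  pvAreasLoop (Text.map PySem.Str.lower) pvTermsDict.keys

-- ===== PORT B =====
-- module-level build of _PRIO: term -> (priority, area), first occurrence of a term wins
def pvPrio : PySem.Dict String (Int × String) :=
  (pvTerms.foldl
    (fun st aw => aw.2.foldl
      (fun (st : PySem.Dict String (Int × String) × Int) w =>
        (if st.1.contains w then st.1 else st.1.insert w (st.2, aw.1), st.2 + 1)) st)
    (PySem.Dict.empty, 0)).1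

-- one step of B's single pass: keep the lookup result of minimal priority
def pvStep (best : Option (Int × String)) (tok : String) : Option (Int × String) :=
  match pvPrio.get? tok with
  | none => best
  | some p =>
    match best with
    | none => some p
    | some b => if p.1 < b.1 then some p else some b

def roleApplied_alt (Text : List String) : Option String :=
  ((Text.map PySem.Str.lower).foldl pvStep none).map (fun p => p.2)

-- ===== PRECONDITION & SPEC =====
def Spec_roleApplied (Text : List String) (out : Option String) : Prop := out = roleApplied_alt Text
instance (Text : List String) (out : Option String) : Decidable (Spec_roleApplied Text out) := by unfold Spec_roleApplied; infer_instance

-- ===== CLAIM (what is proved, stated in full; the proofs are below) =====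
def Claim_equal_roleApplied : Prop := ∀ (Text : List String), Dom_roleApplied Text → Spec_roleApplied Text (roleApplied Text)

-- ===== LEMMAS AND PROOFS =====

-- the term table flattened in scan order, each term paired with its area
def pvFlat : List (String × String) := pvTerms.flatMap (fun aw => aw.2.map (fun w => (w, aw.1)))

-- the common characterisation: first flattened (term, area) whose term occurs in T
def pvFind (T : List String) : Option (String × String) := pvFlat.find? (fun p => T.contains p.1)

-- A's inner loop is find? over the words tagged with the area
theorem pvInner_eq_find (T : List String) (area : String) (ws : List String) :
    pvInner T area ws =
      ((ws.map (fun w => (w, area))).find? (fun p => T.contains p.1)).map Prod.snd := by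
  induction ws with
  | nil => rfl
  | cons w ws ih =>
    simp only [pvInner, List.map_cons, List.find?_cons]
    by_cases h : w ∈ T <;> simp [h, ih]

-- A = find? over the flattened table
theorem pvA_eq_find (T : List String) :
    pvAreasLoop T pvTermsDict.keys = (pvFind T).map Prod.snd := by
  have hm : ∀ (x y : Option String), (match x with | some r => some r | none => y) = x.or y := by
    intro x y; cases x <;> rfl
  have hflat : pvFlat =
      (pvTermsDict.getD "WorkDay ERP" []).map (fun w => (w, "WorkDay ERP")) ++
      ((pvTermsDict.getD "Peoplesoft" []).map (fun w => (w, "Peoplesoft")) ++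
       ((pvTermsDict.getD "Database Developer" []).map (fun w => (w, "Database Developer")) ++
        (pvTermsDict.getD "Java Developer" []).map (fun w => (w, "Java Developer")))) := by decide
  rw [show pvTermsDict.keys = ["WorkDay ERP", "Peoplesoft", "Database Developer", "Java Developer"]
      from by decide]
  unfold pvFind
  rw [hflat]
  simp only [pvAreasLoop, hm, pvInner_eq_find, List.find?_append]
  simp [Option.map_or]

-- what the builder's dict answers: first-occurrence index (offset by n) and that entry's area
theorem pvBuild_get? (l : List (String × String)) (d : PySem.Dict String (Int × String)) (n : Int) (w : String) :
    ((l.foldl (fun st p =>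
      ((if st.1.contains p.1 then st.1 else st.1.insert p.1 (st.2, p.2)), st.2 + 1)) (d, n)).1).get? w
      = (d.get? w).or ((l.findIdx? (fun p => p.1 == w)).map
          (fun j : Nat => (((n + j : Int), (l.getD j ("", "")).2)))) := by
  induction l generalizing d n with
  | nil => simp
  | cons p rest ih =>
    simp only [List.foldl_cons, List.findIdx?_cons]
    by_cases hw : p.1 = w
    · by_cases hc : d.contains p.1
      · rw [if_pos hc, ih]
        have hs : (d.get? w).isSome := by
          rw [PySem.Dict.contains_eq_isSome_get?] at hc; rwa [hw] at hc
        obtain ⟨v, hv⟩ := Option.isSome_iff_exists.mp hs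
        simp [hv, hw]
      · rw [if_neg hc, ih]
        have hnone : d.get? w = none := by
          rw [← hw]
          rw [PySem.Dict.contains_eq_isSome_get?] at hc
          simpa using hc
        have hself : (d.insert p.1 (n, p.2)).get? w = some (n, p.2) := by
          rw [PySem.Dict.get?_insert]; simp [hw]
        simp [hnone, hself]
        exact hw
    · have hg : ∀ (v : Int × String),
          (if d.contains p.1 then d else d.insert p.1 v).get? w = d.get? w := by
        intro v
        by_cases hc : d.contains p.1
        · rw [if_pos hc]
        · rw [if_neg hc, PySem.Dict.get?_insert_of_ne]
          exact fun h => hw h.symm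
      rw [ih, hg]
      have hb : (p.1 == w) = false := by simpa using hw
      rw [hb]
      cases hj : rest.findIdx? (fun q => q.1 == w) with
      | none => simp
      | some j =>
        cases hd : d.get? w with
        | none =>
          simp only [Option.map_some, Option.none_or, if_neg (by simp : ¬(false = true)),
            List.getD_cons_succ, Option.some.injEq, Prod.mk.injEq]
          exact ⟨by push_cast; ring, trivial⟩
        | some v => simp

theorem pvPrio_get? (w : String) :
    pvPrio.get? w = (pvFlat.findIdx? (fun p => p.1 == w)).map
        (fun j : Nat => (((j : Int), (pvFlat.getD j ("", "")).2))) := by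
  have h : pvPrio = (pvFlat.foldl (fun st p =>
      ((if st.1.contains p.1 then st.1 else st.1.insert p.1 (st.2, p.2)), st.2 + 1))
      (PySem.Dict.empty, (0 : Int))).1 := by
    set_option maxRecDepth 10000 in decide
  rw [h, pvBuild_get?]
  simp [PySem.Dict.get?_empty]

theorem pvStep_none_iff (b : Option (Int × String)) (t : String) :
    pvStep b t = none ↔ (b = none ∧ pvPrio.get? t = none) := by
  unfold pvStep
  cases hlk : pvPrio.get? t with
  | none => simp
  | some p =>
    cases b with
    | none => simp
    | some q => by_cases hlt : p.1 < q.1 <;> simp [hlt]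

theorem pvStep_some (b : Option (Int × String)) (t : String) (r : Int × String)
    (h : pvStep b t = some r) : b = some r ∨ pvPrio.get? t = some r := by
  unfold pvStep at h
  cases hlk : pvPrio.get? t with
  | none => rw [hlk] at h; exact Or.inl h
  | some p =>
    rw [hlk] at h
    cases b with
    | none => dsimp only at h; exact Or.inr (by rw [← h])
    | some q =>
      dsimp only at h
      by_cases hlt : p.1 < q.1
      · rw [if_pos hlt] at h; exact Or.inr (by rw [← h])
      · rw [if_neg hlt] at h; exact Or.inl (by rw [← h])

theorem pvStep_min (b : Option (Int × String)) (t : String) (r : Int × String)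
    (h : pvStep b t = some r) :
    (∀ p, b = some p → r.1 ≤ p.1) ∧ (∀ p, pvPrio.get? t = some p → r.1 ≤ p.1) := by
  unfold pvStep at h
  cases hlk : pvPrio.get? t with
  | none =>
    rw [hlk] at h
    constructor
    · intro p hp; rw [hp] at h; cases h; rfl
    · intro p hp; cases hp
  | some q =>
    rw [hlk] at h
    cases b with
    | none =>
      dsimp only at h
      cases h
      constructor
      · intro p hp; cases hp
      · intro p hp; cases hp; rfl
    | some b0 =>
      dsimp only at h
      by_cases hlt : q.1 < b0.1
      · rw [if_pos hlt] at h
        cases h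
        constructor
        · intro p hp; cases hp; omega
        · intro p hp; cases hp; rfl
      · rw [if_neg hlt] at h
        cases h
        constructor
        · intro p hp; cases hp; rfl
        · intro p hp; cases hp; omega

theorem pvFold_none (T : List String) (b : Option (Int × String)) :
    T.foldl pvStep b = none ↔ (b = none ∧ ∀ t ∈ T, pvPrio.get? t = none) := by
  induction T generalizing b with
  | nil => simp
  | cons t T ih =>
    rw [List.foldl_cons, ih, pvStep_none_iff]
    constructor
    · rintro ⟨⟨h1, h2⟩, h3⟩
      refine ⟨h1, fun x hx => ?_⟩
      rcases List.mem_cons.mp hx with rfl | hx'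
      · exact h2
      · exact h3 x hx'
    · rintro ⟨h1, h2⟩
      exact ⟨⟨h1, h2 t (by simp)⟩, fun x hx => h2 x (by simp [hx])⟩

theorem pvFold_some (T : List String) (b : Option (Int × String)) (k : Int) (a : String)
    (h : T.foldl pvStep b = some (k, a)) :
    (b = some (k, a) ∨ ∃ t ∈ T, pvPrio.get? t = some (k, a)) ∧
    (∀ p, b = some p → k ≤ p.1) ∧
    (∀ t ∈ T, ∀ p, pvPrio.get? t = some p → k ≤ p.1) := by
  induction T generalizing b with
  | nil =>
    simp only [List.foldl_nil] at h
    refine ⟨Or.inl h, fun p hp => ?_, by simp⟩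
    rw [h] at hp; cases hp; rfl
  | cons t T ih =>
    rw [List.foldl_cons] at h
    obtain ⟨hmem, hbnd, htbnd⟩ := ih (pvStep b t) h
    cases hstep : pvStep b t with
    | none =>
      obtain ⟨hbnone, hlknone⟩ := (pvStep_none_iff b t).mp hstep
      refine ⟨?_, ?_, ?_⟩
      · rcases hmem with hm | ⟨t', ht', hlk'⟩
        · exact absurd hm (by simp [hstep])
        · exact Or.inr ⟨t', by simp [ht'], hlk'⟩
      · intro p hp; rw [hbnone] at hp; cases hp
      · intro x hx p hp
        rcases List.mem_cons.mp hx with rfl | hx'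
        · rw [hlknone] at hp; cases hp
        · exact htbnd x hx' p hp
    | some r =>
      have hkr : k ≤ r.1 := hbnd r hstep
      obtain ⟨hminb, hmint⟩ := pvStep_min b t r hstep
      refine ⟨?_, ?_, ?_⟩
      · rcases hmem with hm | ⟨t', ht', hlk'⟩
        · rcases pvStep_some b t _ hm with h1 | h1
          · exact Or.inl h1
          · exact Or.inr ⟨t, by simp, h1⟩
        · exact Or.inr ⟨t', by simp [ht'], hlk'⟩
      · intro p hp
        have := hminb p hp; omega
      · intro x hx p hp
        rcases List.mem_cons.mp hx with rfl | hx'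
        · have := hmint p hp; omega
        · exact htbnd x hx' p hp

-- B = find? over the flattened table
theorem pvB_eq_find (T : List String) :
    (T.foldl pvStep none).map (fun p => p.2) = (pvFind T).map Prod.snd := by
  cases hf : T.foldl pvStep none with
  | none =>
    obtain ⟨-, hall⟩ := (pvFold_none T none).mp hf
    have hfind : pvFind T = none := by
      unfold pvFind
      rw [List.find?_eq_none]
      intro p hp hc
      have hmemT : p.1 ∈ T := by simpa using hc
      have hlk := hall p.1 hmemT
      rw [pvPrio_get?] at hlk
      rw [Option.map_eq_none_iff, List.findIdx?_eq_none_iff] at hlk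
      have := hlk p hp
      simp at this
    rw [hfind]; rfl
  | some r =>
    obtain ⟨k, a⟩ := r
    obtain ⟨hmem, -, hbndT⟩ := pvFold_some T none k a hf
    rcases hmem with hm | ⟨t, htT, hlk⟩
    · cases hm
    · rw [pvPrio_get?] at hlk
      obtain ⟨j, hj, hja⟩ := Option.map_eq_some_iff.mp hlk
      obtain ⟨hjlen, hjbeq, -⟩ := List.findIdx?_eq_some_iff_getElem.mp hj
      have hkj : k = (j : Int) := (Prod.mk.injEq _ _ _ _ ▸ hja).1.symm
      have haj : a = (pvFlat.getD j ("", "")).2 := (Prod.mk.injEq _ _ _ _ ▸ hja).2.symm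
      have hjt : pvFlat[j].1 = t := by simpa using hjbeq
      have hpred : T.contains (pvFlat[j].1) = true := by
        rw [hjt]; simpa using htT
      cases hq : pvFind T with
      | none =>
        unfold pvFind at hq
        rw [List.find?_eq_none] at hq
        exact absurd hpred (by simpa using hq pvFlat[j] (List.getElem_mem hjlen))
      | some q =>
        unfold pvFind at hq
        obtain ⟨hfq, i, hilen, hiq, himin⟩ := List.find?_eq_some_iff_getElem.mp hq
        -- i ≤ j by minimality of i
        have hij : i ≤ j := by
          by_contra hij
          exact absurd hpred (by simpa using himin j (by omega))
        -- q.1 ∈ T, so it has a priority entry at some index j'' ≤ i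
        have hqT : q.1 ∈ T := by simpa using hfq
        have hlkq := hbndT q.1 hqT
        have hex : pvFlat.findIdx? (fun p => p.1 == q.1) ≠ none := by
          intro hnone0
          rw [List.findIdx?_eq_none_iff] at hnone0
          have := hnone0 pvFlat[i] (List.getElem_mem hilen)
          rw [hiq] at this
          simp at this
        cases hj2 : pvFlat.findIdx? (fun p => p.1 == q.1) with
        | none => exact absurd hj2 hex
        | some j2 =>
          obtain ⟨hj2len, hj2beq, hj2min⟩ := List.findIdx?_eq_some_iff_getElem.mp hj2
          have hj2i : j2 ≤ i := by
            by_contra hj2i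
            have := hj2min i (by omega)
            rw [hiq] at this
            simp at this
          have hkj2 : k ≤ (j2 : Int) := by
            have := hlkq _ (by rw [pvPrio_get?, hj2]; rfl)
            simpa using this
          have hieq : j = i := by omega
          subst hieq
          have : a = q.2 := by
            rw [haj, List.getD_eq_getElem _ _ hjlen, hiq]
          rw [this]
          rfl

-- ===== VERDICT (by name: the statement is the Claim_ definition above) =====
theorem roleApplied_spec : Claim_equal_roleApplied := by
  intro Text _
  unfold Spec_roleApplied roleApplied roleApplied_alt
  rw [pvA_eq_find, pvB_eq_find]
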